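-- pv_equiv track=rewrite | github.com/zubusoomro/Deep-Seek-AI-Tradubg-Bot | src/data/news_filter.py | _get_affected_symbols
-- ===== SOURCE A (Python) =====
-- from typing import Dict, List, Optional
--
-- def _get_affected_symbols(events: List[Dict], symbols: List[str]) -> Dict[str, bool]:
--     """Determine which symbols are affected by news events"""
--     affected = {symbol: False for symbol in symbols}
--
--     if not events:
--         return affected
--
--     # Map events to symbols
--     for event in events:
--         event_currency = event.get('country', '').lower()
--         impact = event.get('impact', '').lower()
--
--         # High impact events affect all related symbols
--         if impact == 'high':
--             if 'usd' in event_currency: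
--                 for symbol in ['USDJPY', 'EURUSD', 'GBPUSD']:
--                     if symbol in symbols:
--                         affected[symbol] = True
--             elif 'eur' in event_currency:
--                 for symbol in ['EURUSD', 'EURGBP']:
--                     if symbol in symbols:
--                         affected[symbol] = True
--             elif 'jpy' in event_currency:
--                 for symbol in ['USDJPY']:
--                     if symbol in symbols:
--                         affected[symbol] = True
--             elif 'gold' in event_currency or 'xau' in event_currency:
--                 for symbol in ['XAUUSD']:
--                     if symbol in symbols:
--                         affected[symbol] = True
--
--     return affected
-- ===== SOURCE B (Python) =====
-- # Two-pass rewrite: first collect the set of active currency groups from the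
-- # high-impact events (first-match per event), then mark each group's symbols once.
-- _GROUPS = [
--     (('usd',), ['USDJPY', 'EURUSD', 'GBPUSD']),
--     (('eur',), ['EURUSD', 'EURGBP']),
--     (('jpy',), ['USDJPY']),
--     (('gold', 'xau'), ['XAUUSD']),
-- ]
--
--
-- def _get_affected_symbols(events, symbols):
--     active = set()
--     for event in events:
--         if event.get('impact', '').lower() == 'high':
--             country = event.get('country', '').lower()
--             for i, (keywords, _) in enumerate(_GROUPS):
--                 if any(k in country for k in keywords):
--                     active.add(i)
--                     break
--     affected = {symbol: False for symbol in symbols}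
--     for i, (_, group_symbols) in enumerate(_GROUPS):
--         if i in active:
--             for symbol in group_symbols:
--                 if symbol in symbols:
--                     affected[symbol] = True
--     return affected
-- ===== Notes on version B (the rewrite author's own statement) =====
-- stated objective: alternative
-- what changed: Instead of mutating the result dict inside the event loop with a four-way elif chain of inline marking loops, B first collects the set of active keyword groups from a (keywords, symbols) table in one pass over the events, then marks each active group's symbols once in a second pass.
import Mathlib
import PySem

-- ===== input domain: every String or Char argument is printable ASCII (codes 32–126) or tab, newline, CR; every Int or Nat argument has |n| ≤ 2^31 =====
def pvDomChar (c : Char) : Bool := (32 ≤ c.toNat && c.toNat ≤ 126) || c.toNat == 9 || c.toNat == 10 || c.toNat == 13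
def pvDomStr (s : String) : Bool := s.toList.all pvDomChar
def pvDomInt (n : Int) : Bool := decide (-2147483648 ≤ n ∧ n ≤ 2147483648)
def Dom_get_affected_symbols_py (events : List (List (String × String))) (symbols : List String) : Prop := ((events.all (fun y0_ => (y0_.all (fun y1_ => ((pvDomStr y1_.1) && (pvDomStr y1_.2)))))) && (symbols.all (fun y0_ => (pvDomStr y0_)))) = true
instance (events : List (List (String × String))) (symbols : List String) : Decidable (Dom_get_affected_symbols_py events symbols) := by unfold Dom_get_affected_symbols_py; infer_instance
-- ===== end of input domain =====

-- ===== PORT A =====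
-- B changes the decomposition (collect active keyword groups first, then mark once); same results, similar cost.
def get_affected_symbols_py (events : List (List (String × String))) (symbols : List String) : List (String × Bool) :=
  -- affected = {symbol: False for symbol in symbols}
  let affected : PySem.Dict String Bool := symbols.foldl (fun d s => d.insert s false) PySem.Dict.empty
  if events.isEmpty then affected.items else
  (events.foldl (fun d event =>
      let event_currency := PySem.Str.lower (PySem.Dict.getD (PySem.Dict.mk event) "country" "")
      let impact := PySem.Str.lower (PySem.Dict.getD (PySem.Dict.mk event) "impact" "")
      if impact == "high" then
        if PySem.Str.isIn "usd" event_currency then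
          ["USDJPY", "EURUSD", "GBPUSD"].foldl (fun d symbol => if symbols.contains symbol then d.insert symbol true else d) d
        else if PySem.Str.isIn "eur" event_currency then
          ["EURUSD", "EURGBP"].foldl (fun d symbol => if symbols.contains symbol then d.insert symbol true else d) d
        else if PySem.Str.isIn "jpy" event_currency then
          ["USDJPY"].foldl (fun d symbol => if symbols.contains symbol then d.insert symbol true else d) d
        else if PySem.Str.isIn "gold" event_currency || PySem.Str.isIn "xau" event_currency then
          ["XAUUSD"].foldl (fun d symbol => if symbols.contains symbol then d.insert symbol true else d) d
        else d
      else d) affected).items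

-- ===== PORT B =====
-- the module-level _GROUPS table of Source B
def pvGROUPS : List (List String × List String) :=
  [(["usd"], ["USDJPY", "EURUSD", "GBPUSD"]),
   (["eur"], ["EURUSD", "EURGBP"]),
   (["jpy"], ["USDJPY"]),
   (["gold", "xau"], ["XAUUSD"])]

-- the 'for i, (keywords, _) in enumerate(_GROUPS): if any(...): active.add(i); break' loop
def pvFirstGroup : List (List String × List String) → Int → String → Option Int
  | [], _, _ => none
  | (keywords, _) :: rest, i, country =>
      if keywords.any (fun k => PySem.Str.isIn k country) then some i
      else pvFirstGroup rest (i + 1) country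

def get_affected_symbols_py_alt (events : List (List (String × String))) (symbols : List String) : List (String × Bool) :=
  let active : PySem.Set Int := events.foldl (fun a event =>
      if PySem.Str.lower (PySem.Dict.getD (PySem.Dict.mk event) "impact" "") == "high" then
        match pvFirstGroup pvGROUPS 0 (PySem.Str.lower (PySem.Dict.getD (PySem.Dict.mk event) "country" "")) with
        | some i => PySem.Set.add a i
        | none => a
      else a) PySem.Set.empty
  let affected : PySem.Dict String Bool := symbols.foldl (fun d s => d.insert s false) PySem.Dict.empty
  ((PySem.List.enumerate pvGROUPS 0).foldl (fun d p =>
      if PySem.Set.contains active p.1 then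
        p.2.2.foldl (fun d symbol => if symbols.contains symbol then d.insert symbol true else d) d
      else d) affected).items

-- ===== PRECONDITION & SPEC =====
def Spec_get_affected_symbols_py (events : List (List (String × String))) (symbols : List String) (out : List (String × Bool)) : Prop := out = get_affected_symbols_py_alt events symbols
instance (events : List (List (String × String))) (symbols : List String) (out : List (String × Bool)) : Decidable (Spec_get_affected_symbols_py events symbols out) := by unfold Spec_get_affected_symbols_py; infer_instance

-- ===== CLAIM =====
def Claim_equal_get_affected_symbols_py : Prop := ∀ (events : List (List (String × String))) (symbols : List String), Dom_get_affected_symbols_py events symbols → Spec_get_affected_symbols_py events symbols (get_affected_symbols_py events symbols)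

-- ===== LEMMAS AND PROOFS =====

def pvIdx (event : List (String × String)) : Option Int :=
  if PySem.Str.lower (PySem.Dict.getD (PySem.Dict.mk event) "impact" "") == "high" then
    pvFirstGroup pvGROUPS 0 (PySem.Str.lower (PySem.Dict.getD (PySem.Dict.mk event) "country" ""))
  else none

def pvSyms (i : Int) : List String :=
  if i == 0 then ["USDJPY", "EURUSD", "GBPUSD"]
  else if i == 1 then ["EURUSD", "EURGBP"]
  else if i == 2 then ["USDJPY"]
  else if i == 3 then ["XAUUSD"]
  else []

def pvHit (m : Option Int) (s : String) : Bool :=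
  match m with
  | some i => (pvSyms i).contains s
  | none => false

def pvApply (symbols g : List String) (d : PySem.Dict String Bool) : PySem.Dict String Bool :=
  g.foldl (fun d symbol => if symbols.contains symbol then d.insert symbol true else d) d

def pvStepA (symbols : List String) (d : PySem.Dict String Bool) (event : List (String × String)) : PySem.Dict String Bool :=
  let event_currency := PySem.Str.lower (PySem.Dict.getD (PySem.Dict.mk event) "country" "")
  let impact := PySem.Str.lower (PySem.Dict.getD (PySem.Dict.mk event) "impact" "")
  if impact == "high" then
    if PySem.Str.isIn "usd" event_currency then pvApply symbols ["USDJPY", "EURUSD", "GBPUSD"] d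
    else if PySem.Str.isIn "eur" event_currency then pvApply symbols ["EURUSD", "EURGBP"] d
    else if PySem.Str.isIn "jpy" event_currency then pvApply symbols ["USDJPY"] d
    else if PySem.Str.isIn "gold" event_currency || PySem.Str.isIn "xau" event_currency then pvApply symbols ["XAUUSD"] d
    else d
  else d

def pvStepSet (a : PySem.Set Int) (event : List (String × String)) : PySem.Set Int :=
  if PySem.Str.lower (PySem.Dict.getD (PySem.Dict.mk event) "impact" "") == "high" then
    match pvFirstGroup pvGROUPS 0 (PySem.Str.lower (PySem.Dict.getD (PySem.Dict.mk event) "country" "")) with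
    | some i => PySem.Set.add a i
    | none => a
  else a

lemma pvApply_contains (symbols g : List String) (d : PySem.Dict String Bool) (k : String) :
    (pvApply symbols g d).contains k = (k ∈ symbols && g.contains k || d.contains k) := by
  induction g generalizing d with
  | nil => simp [pvApply]
  | cons s g ih =>
    simp only [pvApply, List.foldl_cons] at ih ⊢
    rw [ih]
    by_cases hs : symbols.contains s = true
    · rw [if_pos hs, PySem.Dict.contains_insert]
      by_cases hk : k = s
      · simp_all
      · have hks : (k == s) = false := by simp [hk]
        rw [hks]
        simp [hk]
    · rw [if_neg hs]
      by_cases hk : k = s <;> simp_all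

lemma pvApply_items (symbols g : List String) (d : PySem.Dict String Bool)
    (h : ∀ s, s ∈ symbols → d.contains s = true) :
    (pvApply symbols g d).items
      = d.items.map (fun p => if g.contains p.1 && symbols.contains p.1 then (p.1, true) else p) := by
  induction g generalizing d with
  | nil => simp [pvApply]
  | cons s g ih =>
    have h1 : ∀ t, t ∈ symbols →
        (if symbols.contains s = true then d.insert s true else d).contains t = true := by
      intro t ht
      by_cases hs : symbols.contains s = true
      · rw [if_pos hs, PySem.Dict.contains_insert]; simp [h t ht]
      · rw [if_neg hs]; exact h t ht
    have hih := ih (if symbols.contains s = true then d.insert s true else d) h1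
    simp only [pvApply, List.foldl_cons] at hih ⊢
    rw [hih]
    by_cases hs : symbols.contains s = true
    · rw [if_pos hs, PySem.Dict.items_insert_of_contains d true (h s (by simpa using hs)), List.map_map]
      apply List.map_congr_left
      intro p _
      obtain ⟨k, b⟩ := p
      by_cases hk : k = s <;> by_cases hg : k ∈ g <;> simp_all
    · rw [if_neg hs]
      apply List.map_congr_left
      intro p _
      obtain ⟨k, b⟩ := p
      by_cases hk : k = s <;> by_cases hg : k ∈ g <;> simp_all

lemma pvStepA_items (symbols : List String) (d : PySem.Dict String Bool) (e : List (String × String))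
    (h : ∀ s, s ∈ symbols → d.contains s = true) :
    (pvStepA symbols d e).items
      = d.items.map (fun p => if pvHit (pvIdx e) p.1 && symbols.contains p.1 then (p.1, true) else p) := by
  unfold pvStepA pvIdx
  by_cases hi : (PySem.Str.lower (PySem.Dict.getD (PySem.Dict.mk e) "impact" "") == "high") = true
  · rw [if_pos hi, if_pos hi]
    simp only [pvFirstGroup, pvGROUPS, List.any_cons, List.any_nil, Bool.or_false]
    split_ifs with h1 h2 h3 h4 <;>
      simp only [pvHit, pvSyms] <;>
      first
        | (rw [pvApply_items symbols _ d h]; simp)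
        | simp
  · rw [if_neg hi, if_neg hi]
    simp [pvHit]

lemma pvStepA_contains (symbols : List String) (d : PySem.Dict String Bool) (e : List (String × String))
    (h : ∀ s, s ∈ symbols → d.contains s = true) (k : String) :
    (pvStepA symbols d e).contains k = d.contains k := by
  unfold pvStepA
  dsimp only
  split_ifs <;> (try rfl) <;>
    (rw [pvApply_contains]
     by_cases hk : k ∈ symbols
     · simp [h k hk]
     · simp [hk])

lemma foldA_items (symbols : List String) (es : List (List (String × String))) (d : PySem.Dict String Bool)
    (h : ∀ s, s ∈ symbols → d.contains s = true) :
    (es.foldl (pvStepA symbols) d).items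
      = d.items.map (fun p =>
          if es.any (fun e => pvHit (pvIdx e) p.1) && symbols.contains p.1 then (p.1, true) else p) := by
  induction es generalizing d with
  | nil => simp
  | cons e es ih =>
    have h1 : ∀ s, s ∈ symbols → (pvStepA symbols d e).contains s = true := by
      intro s hs; rw [pvStepA_contains symbols d e h]; exact h s hs
    rw [List.foldl_cons, ih _ h1, pvStepA_items symbols d e h, List.map_map]
    apply List.map_congr_left
    intro p _
    obtain ⟨k, b⟩ := p
    by_cases hc : k ∈ symbols <;>
      by_cases hA : pvHit (pvIdx e) k = true <;>
      by_cases hB : es.any (fun e => pvHit (pvIdx e) k) = true <;>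
      simp_all

lemma pvStepSet_eq (a : PySem.Set Int) (e : List (String × String)) :
    pvStepSet a e = match pvIdx e with | some i => PySem.Set.add a i | none => a := by
  unfold pvStepSet pvIdx
  by_cases hi : (PySem.Str.lower (PySem.Dict.getD (PySem.Dict.mk e) "impact" "") == "high") = true <;>
    simp [hi]

lemma active_mem (es : List (List (String × String))) (a : PySem.Set Int) (i : Int) :
    i ∈ es.foldl pvStepSet a ↔ (i ∈ a ∨ ∃ e ∈ es, pvIdx e = some i) := by
  induction es generalizing a with
  | nil => simp
  | cons e es ih =>
    rw [List.foldl_cons, pvStepSet_eq, ih]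
    cases hm : pvIdx e with
    | none => simp [hm]
    | some j =>
      simp only [PySem.Set.mem_add, List.mem_cons]
      constructor
      · rintro (⟨hi | hj⟩ | ⟨e', he', hi⟩)
        · exact Or.inl hi
        · exact Or.inr ⟨e, Or.inl rfl, by rw [hm, hj]⟩
        · exact Or.inr ⟨e', Or.inr he', hi⟩
      · rintro (hi | ⟨e', (rfl | he'), hi⟩)
        · exact Or.inl (Or.inl hi)
        · rw [hm] at hi; exact Or.inl (Or.inr (Option.some.inj hi).symm)
        · exact Or.inr ⟨e', he', hi⟩

lemma pvStepB_items (symbols : List String) (active : PySem.Set Int)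
    (q : Int × (List String × List String)) (d : PySem.Dict String Bool)
    (h : ∀ s, s ∈ symbols → d.contains s = true) :
    (if PySem.Set.contains active q.1 then pvApply symbols q.2.2 d else d).items
      = d.items.map (fun p =>
          if (PySem.Set.contains active q.1 && q.2.2.contains p.1) && symbols.contains p.1
          then (p.1, true) else p) := by
  by_cases hq : PySem.Set.contains active q.1 = true
  · have hq' : q.1 ∈ active := (PySem.Set.contains_iff active q.1).mp hq
    rw [if_pos hq, pvApply_items symbols _ d h]
    simp [hq']
  · have hq' : q.1 ∉ active := fun hmem => hq ((PySem.Set.contains_iff active q.1).mpr hmem)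
    rw [if_neg hq]
    simp [hq']

lemma pvStepB_contains (symbols : List String) (active : PySem.Set Int)
    (q : Int × (List String × List String)) (d : PySem.Dict String Bool)
    (h : ∀ s, s ∈ symbols → d.contains s = true) (k : String) :
    (if PySem.Set.contains active q.1 then pvApply symbols q.2.2 d else d).contains k = d.contains k := by
  split_ifs
  · rw [pvApply_contains]
    by_cases hk : k ∈ symbols
    · simp [h k hk]
    · simp [hk]
  · rfl

def pvMark (f C : String → Bool) (p : String × Bool) : String × Bool :=
  if f p.1 && C p.1 then (p.1, true) else p

lemma pvMark_comp (f g C : String → Bool) (p : String × Bool) :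
    pvMark g C (pvMark f C p) = pvMark (fun s => f s || g s) C p := by
  obtain ⟨k, b⟩ := p
  unfold pvMark
  by_cases hf : f k = true <;> by_cases hg : g k = true <;> by_cases hC : C k = true <;>
    simp [hf, hg, hC]

lemma foldB_items (symbols : List String) (active : PySem.Set Int)
    (l : List (Int × (List String × List String))) (d : PySem.Dict String Bool)
    (h : ∀ s, s ∈ symbols → d.contains s = true) :
    (l.foldl (fun d q => if PySem.Set.contains active q.1 then pvApply symbols q.2.2 d else d) d).items
      = d.items.map (fun p =>
          if l.any (fun q => PySem.Set.contains active q.1 && q.2.2.contains p.1) && symbols.contains p.1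
          then (p.1, true) else p) := by
  induction l generalizing d with
  | nil => simp
  | cons q l ih =>
    have h1 : ∀ s, s ∈ symbols →
        (if PySem.Set.contains active q.1 then pvApply symbols q.2.2 d else d).contains s = true := by
      intro s hs; rw [pvStepB_contains symbols active q d h]; exact h s hs
    rw [List.foldl_cons, ih _ h1, pvStepB_items symbols active q d h, List.map_map]
    apply List.map_congr_left
    intro p _
    show pvMark (fun s => l.any (fun q => PySem.Set.contains active q.1 && q.2.2.contains s)) (fun s => symbols.contains s)
        (pvMark (fun s => PySem.Set.contains active q.1 && q.2.2.contains s) (fun s => symbols.contains s) p)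
      = pvMark (fun s => (q :: l).any (fun q => PySem.Set.contains active q.1 && q.2.2.contains s)) (fun s => symbols.contains s) p
    rw [pvMark_comp]
    unfold pvMark
    simp only [List.any_cons]
    rfl

lemma pvFirstGroup_range (c : String) (i : Int) :
    pvFirstGroup pvGROUPS 0 c = some i → i = 0 ∨ i = 1 ∨ i = 2 ∨ i = 3 := by
  intro hfg
  simp only [pvGROUPS, pvFirstGroup] at hfg
  split_ifs at hfg <;> simp_all

lemma pvIdx_range (e : List (String × String)) (i : Int) :
    pvIdx e = some i → i = 0 ∨ i = 1 ∨ i = 2 ∨ i = 3 := by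
  intro hm
  unfold pvIdx at hm
  split_ifs at hm
  exact pvFirstGroup_range _ i hm

lemma mark_eq (es : List (List (String × String))) (s : String) :
    es.any (fun e => pvHit (pvIdx e) s)
      = (PySem.List.enumerate pvGROUPS 0).any (fun q =>
          PySem.Set.contains (es.foldl pvStepSet PySem.Set.empty) q.1 && q.2.2.contains s) := by
  have hen : PySem.List.enumerate pvGROUPS 0
      = [(0, (["usd"], ["USDJPY", "EURUSD", "GBPUSD"])),
         (1, (["eur"], ["EURUSD", "EURGBP"])),
         (2, (["jpy"], ["USDJPY"])),
         (3, (["gold", "xau"], ["XAUUSD"]))] := by decide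
  rw [hen, Bool.eq_iff_iff]
  simp only [List.any_cons, List.any_nil, Bool.or_false, Bool.or_eq_true, Bool.and_eq_true,
    List.any_eq_true, PySem.Set.contains_iff, active_mem]
  constructor
  · rintro ⟨e, he, hhit⟩
    cases hm : pvIdx e with
    | none => rw [hm] at hhit; simp [pvHit] at hhit
    | some i =>
      rw [hm] at hhit
      rcases pvIdx_range e i hm with rfl | rfl | rfl | rfl
      · exact Or.inl ⟨Or.inr ⟨e, he, hm⟩, by simpa [pvHit, pvSyms] using hhit⟩
      · exact Or.inr (Or.inl ⟨Or.inr ⟨e, he, hm⟩, by simpa [pvHit, pvSyms] using hhit⟩)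
      · exact Or.inr (Or.inr (Or.inl ⟨Or.inr ⟨e, he, hm⟩, by simpa [pvHit, pvSyms] using hhit⟩))
      · exact Or.inr (Or.inr (Or.inr ⟨Or.inr ⟨e, he, hm⟩, by simpa [pvHit, pvSyms] using hhit⟩))
  · rintro (⟨hi | ⟨e, he, hm⟩, hs⟩ | ⟨hi | ⟨e, he, hm⟩, hs⟩ | ⟨hi | ⟨e, he, hm⟩, hs⟩ | ⟨hi | ⟨e, he, hm⟩, hs⟩) <;>
      first
        | simp at hi
        | exact ⟨e, he, by rw [hm]; simpa [pvHit, pvSyms] using hs⟩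

lemma d0_contains (symbols : List String) (s : String) (hs : s ∈ symbols) :
    (symbols.foldl (fun d s => d.insert s false) (PySem.Dict.empty : PySem.Dict String Bool)).contains s = true := by
  have hkeys := PySem.Dict.keys_foldl_insert symbols (fun _ _ => false) (PySem.Dict.empty : PySem.Dict String Bool)
  rw [PySem.Dict.contains_iff_mem_keys, hkeys]
  simp [PySem.Dict.keys_empty, PySem.Set.update_nil_left, PySem.Set.mem_ofList, hs]


-- ===== VERDICT =====
theorem get_affected_symbols_py_spec : Claim_equal_get_affected_symbols_py := by
  intro events symbols _
  show get_affected_symbols_py events symbols = get_affected_symbols_py_alt events symbols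
  show (let affected : PySem.Dict String Bool := symbols.foldl (fun d s => d.insert s false) PySem.Dict.empty
        if events.isEmpty then affected.items else (events.foldl (pvStepA symbols) affected).items)
      = ((PySem.List.enumerate pvGROUPS 0).foldl (fun d q =>
          if PySem.Set.contains (events.foldl pvStepSet PySem.Set.empty) q.1 then pvApply symbols q.2.2 d else d)
          (symbols.foldl (fun d s => d.insert s false) PySem.Dict.empty)).items
  have h0 : ∀ s, s ∈ symbols →
      (symbols.foldl (fun d s => d.insert s false) (PySem.Dict.empty : PySem.Dict String Bool)).contains s = true :=
    fun s hs => d0_contains symbols s hs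
  rw [foldB_items symbols _ _ _ h0]
  by_cases he : events.isEmpty
  · rw [if_pos he]
    have hnil : events = [] := List.isEmpty_iff.mp he
    subst hnil
    simp [PySem.Set.contains]
  · rw [if_neg he, foldA_items symbols events _ h0]
    apply List.map_congr_left
    intro p _
    rw [mark_eq events p.1]
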